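-- pv_equiv track=rewrite | github.com/Jessica-Stillwell/diet-parselantro | sententree.py | tag_words
-- ===== SOURCE A (Python) =====
-- def tag_words(sents):
--     """
--     tag_words: adds the occurence to a word for each word in a sublist
--
--     parameters:
--         sents: list of lists, where a sublist represents a sentence
--
--     returns: a list of lists, where elements of a sublist are tagged by their occurence
--     """
--     for j in range(len(sents)):
--         sent = sents[j]
--         d = {}
--         for i in range(len(sent)):
--             # Check if the word is in dictionary
--             word = sent[i]
--             if word in d:
--                 # Increment count of word by 1
--                 d[word] = d[word] + 1
--             else:
--                 # Add the word to dictionary with count 1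
--                 d[word] = 1
--             word = word+"_"+str(d[word])
--             sent[i]= word
--     return sents
-- ===== SOURCE B (Python) =====
-- def tag_words(sents):
--     """
--     tag_words: adds the occurrence to a word for each word in a sublist.
--
--     Mutates each sentence in place and returns the same sents object.
--     Group-by strategy: for each distinct word of a sentence (in first-occurrence
--     order), one pass over the original words assigns that word's occurrences
--     their running numbers 1, 2, ... and writes the tags into the sentence.
--     """
--     for sent in sents:
--         orig = list(sent)
--         for w in dict.fromkeys(orig):
--             k = 0
--             for i, x in enumerate(orig):
--                 if x == w:
--                     k += 1
--                     sent[i] = w + "_" + str(k)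
--     return sents
-- ===== Notes on version B (the rewrite author's own statement) =====
-- stated objective: alternative
-- what changed: Replaces A's single pass with a running count dictionary by a group-by scheme: per sentence, one full scan per distinct word that numbers that word's occurrences 1..k and scatters the tags into place.
import Mathlib
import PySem

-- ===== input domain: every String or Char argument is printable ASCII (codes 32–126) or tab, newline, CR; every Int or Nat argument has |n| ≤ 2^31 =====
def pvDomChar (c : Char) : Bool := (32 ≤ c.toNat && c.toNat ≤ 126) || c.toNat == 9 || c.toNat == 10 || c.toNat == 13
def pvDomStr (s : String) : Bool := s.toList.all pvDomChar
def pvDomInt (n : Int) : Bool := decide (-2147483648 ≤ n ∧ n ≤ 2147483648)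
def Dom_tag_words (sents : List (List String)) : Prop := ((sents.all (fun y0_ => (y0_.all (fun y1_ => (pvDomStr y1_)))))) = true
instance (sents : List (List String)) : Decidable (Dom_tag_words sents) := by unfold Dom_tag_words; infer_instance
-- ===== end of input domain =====

-- B replaces A's single pass with a running count dictionary by a group-by scheme:
-- per sentence, one scan per distinct word numbers that word's occurrences 1..k.
-- Both Pythons mutate sents in place and return it; the equivalence proved here is
-- about the return value.

-- ===== PORT A =====
-- inner loop of A over one sentence, carrying the count dictionary d
def tagAStep (d : PySem.Dict String Int) : List String → List String
  | [] => []
  | w :: rest =>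
      let d' := if d.contains w
                then d.insert w (d.getD w 0 + 1)
                else d.insert w 1
      (w ++ "_" ++ PySem.Int.toStr (d'.getD w 0)) :: tagAStep d' rest

def tag_words (sents : List (List String)) : List (List String) :=
  sents.map (fun sent => tagAStep PySem.Dict.empty sent)

-- ===== PORT B =====
-- inner loop of B: `for i, x in enumerate(orig): if x == w: k += 1; sent[i] = w+"_"+str(k)`
def tagBPass (w : String) : List (Int × String) → Int → List String → List String
  | [], _, cur => cur
  | (i, x) :: rest, k, cur =>
      if x = w
      then tagBPass w rest (k + 1) (cur.set i.toNat (w ++ "_" ++ PySem.Int.toStr (k + 1)))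
      else tagBPass w rest k cur

-- one sentence of B: `for w in dict.fromkeys(orig): k = 0; <inner loop>`
def tagBSent (sent : List String) : List String :=
  (PySem.List.dedup sent).foldl
    (fun cur w => tagBPass w (PySem.List.enumerate sent 0) 0 cur) sent

def tag_words_alt (sents : List (List String)) : List (List String) :=
  sents.map tagBSent

-- ===== PRECONDITION & SPEC =====
def Spec_tag_words (sents : List (List String)) (out : List (List String)) : Prop := out = tag_words_alt sents
instance (sents : List (List String)) (out : List (List String)) : Decidable (Spec_tag_words sents out) := by unfold Spec_tag_words; infer_instance

-- ===== CLAIM (what is proved, stated in full; the proofs are below) =====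
def Claim_equal_tag_words : Prop := ∀ (sents : List (List String)), Dom_tag_words sents → Spec_tag_words sents (tag_words sents)

-- ===== LEMMAS AND PROOFS =====

-- the intended tag at position j of a sentence
def tagSpec (sent : List String) (j : Nat) : String :=
  sent.getD j "" ++ "_" ++ PySem.Int.toStr (((sent.take (j + 1)).count (sent.getD j "") : Nat) : Int)

-- common reference for the A side: tag ws given the already-seen prefix p
def tagRef (p : List String) : List String → List String
  | [] => []
  | w :: rest => (w ++ "_" ++ PySem.Int.toStr ((p.count w : Int) + 1)) :: tagRef (p ++ [w]) rest

lemma tagA_eq_ref (ws : List String) : ∀ (d : PySem.Dict String Int) (p : List String),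
    (∀ w, d.get? w = if p.count w = 0 then none else some ((p.count w : Nat) : Int)) →
    tagAStep d ws = tagRef p ws := by
  induction ws with
  | nil => intro d p _; rfl
  | cons w rest ih =>
    intro d p hinv
    have hc := hinv w
    by_cases h0 : p.count w = 0
    · have hget : d.get? w = none := by simp [hc, h0]
      have hcont : d.contains w = false := by
        have := PySem.Dict.get?_eq_none_iff_contains (d := d) (k := w)
        simp [hget] at this ⊢
        tauto
      have hd' : (if d.contains w then d.insert w (d.getD w 0 + 1) else d.insert w 1)
          = d.insert w 1 := by simp [hcont]
      simp only [tagAStep, tagRef, hd']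
      congr 1
      · simp [PySem.Dict.getD_insert_self, h0]
      · apply ih
        intro w'
        by_cases hw : w' = w
        · subst hw
          simp [PySem.Dict.get?_insert_self, List.count_append, h0]
        · rw [PySem.Dict.get?_insert]
          simp only [hw, if_false, hinv w']
          have hw' : ¬ w = w' := fun h => hw h.symm
          simp [List.count_append, hw']
    · have hget : d.get? w = some ((p.count w : Nat) : Int) := by simp [hc, h0]
      have hcont : d.contains w = true := by
        have := PySem.Dict.get?_eq_none_iff_contains (d := d) (k := w)
        by_contra hfalse
        simp at hfalse
        rw [hfalse] at this
        simp [hget] at this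
      have hgd : d.getD w 0 = ((p.count w : Nat) : Int) := by
        simp [PySem.Dict.getD, hget]
      have hd' : (if d.contains w then d.insert w (d.getD w 0 + 1) else d.insert w 1)
          = d.insert w ((p.count w : Int) + 1) := by simp [hcont, hgd]
      simp only [tagAStep, tagRef, hd']
      congr 1
      · simp [PySem.Dict.getD_insert_self]
      · apply ih
        intro w'
        by_cases hw : w' = w
        · subst hw
          rw [PySem.Dict.get?_insert_self]
          simp [List.count_append]
        · rw [PySem.Dict.get?_insert]
          simp only [hw, if_false, hinv w']
          have hw' : ¬ w = w' := fun h => hw h.symm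
          simp [List.count_append, hw']

lemma tagRef_length (p ws : List String) : (tagRef p ws).length = ws.length := by
  induction ws generalizing p with
  | nil => rfl
  | cons w rest ih => simp [tagRef, ih]

lemma tagRef_getD (ws : List String) : ∀ (p : List String) (j : Nat), j < ws.length →
    (tagRef p ws).getD j "" =
      ws.getD j "" ++ "_" ++
        PySem.Int.toStr (((p ++ ws.take (j + 1)).count (ws.getD j "") : Nat) : Int) := by
  induction ws with
  | nil => intro p j h; simp at h
  | cons w rest ih =>
    intro p j h
    cases j with
    | zero =>
      simp [tagRef, List.count_append]
    | succ j =>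
      have hj : j < rest.length := by simpa using h
      have := ih (p ++ [w]) j hj
      simp only [tagRef, List.getD_cons_succ, List.take_succ_cons]
      rw [this]
      congr 2
      simp [List.count_append]

lemma tagBPass_length (w : String) (l : List (Int × String)) :
    ∀ (k : Int) (cur : List String), (tagBPass w l k cur).length = cur.length := by
  induction l with
  | nil => intro k cur; rfl
  | cons p rest ih =>
    intro k cur
    obtain ⟨i, x⟩ := p
    by_cases hx : x = w <;> simp [tagBPass, hx, ih]

lemma tagBPass_getD (w : String) (l : List String) :
    ∀ (m : Nat) (k : Int) (cur : List String), m + l.length ≤ cur.length →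
    ∀ (j : Nat), j < cur.length →
    (tagBPass w (PySem.List.enumerate l (m : Int)) k cur).getD j "" =
      if m ≤ j ∧ j - m < l.length ∧ l.getD (j - m) "" = w
      then w ++ "_" ++ PySem.Int.toStr (k + (((l.take (j - m + 1)).count w : Nat) : Int))
      else cur.getD j "" := by
  induction l with
  | nil =>
    intro m k cur _ j _
    have : ¬ (m ≤ j ∧ j - m < ([] : List String).length ∧ ([] : List String).getD (j - m) "" = w) := by
      rintro ⟨_, h2, _⟩; simp at h2
    simp [PySem.List.enumerate_nil, tagBPass]
    
  | cons x rest ih =>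
    intro m k cur hlen j hj
    rw [PySem.List.enumerate_cons]
    have hmlt : m < cur.length := by simp at hlen; omega
    have h2 : (m : Int) + 1 = ((m + 1 : Nat) : Int) := by push_cast; ring
    by_cases hx : x = w
    · subst hx
      simp only [tagBPass, if_true, Int.toNat_natCast, h2]
      set cur' := cur.set m (x ++ "_" ++ PySem.Int.toStr (k + 1)) with hcur'
      have hlen' : (m + 1) + rest.length ≤ cur'.length := by
        simp [hcur']; simp at hlen; omega
      rw [ih (m + 1) (k + 1) cur' hlen' j (by simp [hcur']; omega)]
      rcases Nat.lt_trichotomy j m with hlt | heq | hgt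
      · have hA : ¬ ((m + 1) ≤ j ∧ j - (m + 1) < rest.length ∧ rest.getD (j - (m + 1)) "" = x) := by
          rintro ⟨h1, _, _⟩; omega
        have hB : ¬ (m ≤ j ∧ j - m < (x :: rest).length ∧ (x :: rest).getD (j - m) "" = x) := by
          rintro ⟨h1, _, _⟩; omega
        rw [if_neg hA, if_neg hB, hcur']
        simp [List.getD, List.getElem?_set_ne (by omega : m ≠ j)]
      · subst heq
        have hA : ¬ ((j + 1) ≤ j ∧ j - (j + 1) < rest.length ∧ rest.getD (j - (j + 1)) "" = x) := by
          rintro ⟨h1, _, _⟩; omega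
        have hB : (j ≤ j ∧ j - j < (x :: rest).length ∧ (x :: rest).getD (j - j) "" = x) := by
          refine ⟨le_refl _, by simp, by simp⟩
        rw [if_neg hA, if_pos hB, hcur']
        simp [List.getD, List.getElem?_set_self hmlt]
      · have hij : j - m = (j - (m + 1)) + 1 := by omega
        have hcond : ((m + 1) ≤ j ∧ j - (m + 1) < rest.length ∧ rest.getD (j - (m + 1)) "" = x) ↔
            (m ≤ j ∧ j - m < (x :: rest).length ∧ (x :: rest).getD (j - m) "" = x) := by
          rw [hij]
          constructor
          · rintro ⟨h1, h2c, h3⟩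
            exact ⟨by omega, by simp; omega, by simpa using h3⟩
          · rintro ⟨h1, h2c, h3⟩
            exact ⟨by omega, by simp at h2c; omega, by simpa using h3⟩
        by_cases hc : (m ≤ j ∧ j - m < (x :: rest).length ∧ (x :: rest).getD (j - m) "" = x)
        · rw [if_pos (hcond.mpr hc), if_pos hc, hij]
          simp only [List.take_succ_cons, List.count_cons, beq_self_eq_true]
          push_cast
          ring_nf
        · rw [if_neg (fun h => hc (hcond.mp h)), if_neg hc, hcur']
          simp [List.getD, List.getElem?_set_ne (by omega : m ≠ j)]
    · simp only [tagBPass, if_neg hx, h2]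
      rw [ih (m + 1) k cur (by simp at hlen ⊢; omega) j hj]
      rcases Nat.lt_trichotomy j m with hlt | heq | hgt
      · have hA : ¬ ((m + 1) ≤ j ∧ j - (m + 1) < rest.length ∧ rest.getD (j - (m + 1)) "" = w) := by
          rintro ⟨h1, _, _⟩; omega
        have hB : ¬ (m ≤ j ∧ j - m < (x :: rest).length ∧ (x :: rest).getD (j - m) "" = w) := by
          rintro ⟨h1, _, _⟩; omega
        rw [if_neg hA, if_neg hB]
      · subst heq
        have hA : ¬ ((j + 1) ≤ j ∧ j - (j + 1) < rest.length ∧ rest.getD (j - (j + 1)) "" = w) := by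
          rintro ⟨h1, _, _⟩; omega
        have hB : ¬ (j ≤ j ∧ j - j < (x :: rest).length ∧ (x :: rest).getD (j - j) "" = w) := by
          rintro ⟨_, _, h3⟩; simp at h3; exact hx h3
        rw [if_neg hA, if_neg hB]
      · have hij : j - m = (j - (m + 1)) + 1 := by omega
        have hcond : ((m + 1) ≤ j ∧ j - (m + 1) < rest.length ∧ rest.getD (j - (m + 1)) "" = w) ↔
            (m ≤ j ∧ j - m < (x :: rest).length ∧ (x :: rest).getD (j - m) "" = w) := by
          rw [hij]
          constructor
          · rintro ⟨h1, h2c, h3⟩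
            exact ⟨by omega, by simp; omega, by simpa using h3⟩
          · rintro ⟨h1, h2c, h3⟩
            exact ⟨by omega, by simp at h2c; omega, by simpa using h3⟩
        by_cases hc : (m ≤ j ∧ j - m < (x :: rest).length ∧ (x :: rest).getD (j - m) "" = w)
        · rw [if_pos (hcond.mpr hc), if_pos hc, hij]
          simp [hx]
        · rw [if_neg (fun h => hc (hcond.mp h)), if_neg hc]

lemma tagB_fold_length (sent : List String) (ws : List String) :
    ∀ (cur : List String),
    (ws.foldl (fun cur w => tagBPass w (PySem.List.enumerate sent 0) 0 cur) cur).length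
      = cur.length := by
  induction ws with
  | nil => intro cur; rfl
  | cons w ws' ih =>
    intro cur
    simp only [List.foldl_cons]
    rw [ih, tagBPass_length]

-- after the fold over words ws, position j carries its tag iff its word is in done ++ ws
lemma tagB_fold_inv (sent : List String) (ws : List String) :
    ∀ (done cur : List String), cur.length = sent.length →
    (∀ j, j < sent.length →
      cur.getD j "" = if sent.getD j "" ∈ done then tagSpec sent j else sent.getD j "") →
    ∀ j, j < sent.length →
    (ws.foldl (fun cur w => tagBPass w (PySem.List.enumerate sent 0) 0 cur) cur).getD j ""
      = if sent.getD j "" ∈ done ++ ws then tagSpec sent j else sent.getD j "" := by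
  induction ws with
  | nil =>
    intro done cur hlen hinv j hj
    simpa using hinv j hj
  | cons w ws' ih =>
    intro done cur hlen hinv j hj
    simp only [List.foldl_cons]
    have h0 : ((0 : Nat) : Int) = (0 : Int) := rfl
    have hstep := tagBPass_getD w sent 0 0 cur (by omega) j (by omega)
    rw [h0] at hstep
    have happ : done ++ w :: ws' = (done ++ [w]) ++ ws' := by simp
    rw [happ]
    apply ih (done ++ [w]) _ (by rw [tagBPass_length]; exact hlen) _ j hj
    intro j' hj'
    have hstep' := tagBPass_getD w sent 0 0 cur (by omega) j' (by omega)
    rw [h0] at hstep'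
    rw [hstep']
    by_cases hw : sent.getD j' "" = w
    · have hcond : (0 ≤ j' ∧ j' - 0 < sent.length ∧ sent.getD (j' - 0) "" = w) := by
        exact ⟨Nat.zero_le _, by omega, by simpa using hw⟩
      rw [if_pos hcond, if_pos (List.mem_append.mpr (Or.inr (List.mem_singleton.mpr hw)))]
      simp only [tagSpec, hw, Nat.sub_zero, zero_add]
    · have hcond : ¬ (0 ≤ j' ∧ j' - 0 < sent.length ∧ sent.getD (j' - 0) "" = w) := by
        rintro ⟨_, _, h3⟩; exact hw (by simpa using h3)
      rw [if_neg hcond, hinv j' hj']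
      by_cases hd : sent.getD j' "" ∈ done
      · rw [if_pos hd, if_pos (List.mem_append.mpr (Or.inl hd))]
      · rw [if_neg hd, if_neg (by
          rw [List.mem_append, List.mem_singleton]
          rintro (h | h)
          · exact hd h
          · exact hw h)]

lemma tagB_eq_ref (sent : List String) : tagBSent sent = tagRef [] sent := by
  have hlen : (tagBSent sent).length = sent.length := by
    unfold tagBSent; rw [tagB_fold_length]
  have hlen2 : (tagRef [] sent).length = sent.length := tagRef_length [] sent
  apply List.ext_getElem (by omega)
  intro j hj hj2
  have hjs : j < sent.length := by omega
  have hB : (tagBSent sent).getD j "" = tagSpec sent j := by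
    unfold tagBSent
    rw [tagB_fold_inv sent (PySem.List.dedup sent) [] sent rfl
        (by intro j' hj'; simp) j hjs]
    have hmem : sent.getD j "" ∈ sent := by
      rw [List.getD_eq_getElem sent "" hjs]; exact List.getElem_mem hjs
    rw [List.nil_append, if_pos ((PySem.List.mem_dedup (x := sent.getD j "") (xs := sent)).mpr hmem)]
  have hR : (tagRef [] sent).getD j "" = tagSpec sent j := by
    rw [tagRef_getD sent [] j hjs]
    simp [tagSpec]
  rw [← List.getD_eq_getElem (tagBSent sent) "" hj, ← List.getD_eq_getElem (tagRef [] sent) "" hj2,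
      hB, hR]

-- ===== VERDICT (by name: the statement is the Claim_ definition above) =====
theorem tag_words_spec : Claim_equal_tag_words := by
  intro sents _
  unfold Spec_tag_words tag_words tag_words_alt
  apply List.map_congr_left
  intro sent _
  rw [tagB_eq_ref]
  apply tagA_eq_ref
  intro w
  simp [PySem.Dict.get?_empty]
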